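-- pv_equiv track=rewrite | github.com/juliusvandermolen-gif/RAG_LUMC | automated_validation.py | extract_pathways
-- ===== SOURCE A (Python) =====
-- def extract_pathways(answer_text):
--     pathways = []
--     pathway_dict = {}
--     lines = [line.strip() for line in answer_text.splitlines() if line.strip()]
--     it = iter(lines)
--     for line in it:
--         if line.endswith(":"):
--             pathway = line[:-1].strip()
--             pathways.append(pathway)
--             genes_line = next(it, "")
--             genes = [gene.strip() for gene in genes_line.split(",") if gene.strip()]
--             pathway_dict[pathway] = genes
--     return pathways, pathway_dict
-- ===== SOURCE B (Python) =====
-- def extract_pathways(answer_text):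
--     lines = [s for s in (line.strip() for line in answer_text.splitlines()) if s]
--     # Marking pass: a line is a header iff it ends with ':' and the previous line was not marked
--     # (a marked line consumes its follower as the genes line, so the follower is never a header).
--     flags = []
--     prev = False
--     for line in lines:
--         prev = line.endswith(":") and not prev
--         flags.append(prev)
--     followers = lines[1:] + [""]
--     items = [(line[:-1].strip(),
--               [g for g in (p.strip() for p in follower.split(",")) if g])
--              for line, follower, flag in zip(lines, followers, flags) if flag]
--     return [p for p, _ in items], dict(items)
-- ===== Notes on version B (the rewrite author's own statement) =====
-- stated objective: alternative
-- what changed: Replaced A's consuming iterator pass (next() pulls the genes line inside the loop) by staged passes: a marking pass computes a per-line header flag (ends with ':' and the previous line unflagged), then the result is assembled by zipping each line with its successor and its flag and comprehending over the marked triples.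
import Mathlib
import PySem

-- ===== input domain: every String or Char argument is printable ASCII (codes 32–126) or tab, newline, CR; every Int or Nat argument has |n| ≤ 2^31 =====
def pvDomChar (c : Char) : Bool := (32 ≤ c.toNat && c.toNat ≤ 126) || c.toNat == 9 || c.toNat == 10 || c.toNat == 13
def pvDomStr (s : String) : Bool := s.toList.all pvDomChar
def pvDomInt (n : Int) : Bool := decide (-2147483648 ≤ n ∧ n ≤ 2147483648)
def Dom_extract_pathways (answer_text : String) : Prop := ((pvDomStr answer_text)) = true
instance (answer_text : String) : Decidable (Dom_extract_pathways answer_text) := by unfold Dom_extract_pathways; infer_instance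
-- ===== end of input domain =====

-- B replaces A's consuming-iterator pass by staged passes: a marking pass computing header
-- flags, then assembly by zipping lines with their successors and flags (alternative; same cost).

-- Shared preprocessing: both Pythons filter-and-strip the split lines the same way.
def pvLines (answer_text : String) : List String :=
  (PySem.Str.splitlines answer_text).filterMap
    (fun l => let s := PySem.Str.strip l; if s ≠ "" then some s else none)

-- '[g for g in (p.strip() for p in follower.split(",")) if g]' (same computation in both Pythons).
def pvGenes (genes_line : String) : List String :=
  ((PySem.Str.split? genes_line ",").getD []).filterMap
    (fun g => let s := PySem.Str.strip g; if s ≠ "" then some s else none)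

-- ===== PORT A =====
-- A's 'for line in it' with 'next(it, "")' consuming one extra element: structural recursion
-- where the header branch also eats the head of the remainder.
def pvLoopA : List String → List String → PySem.Dict String (List String) →
    List String × PySem.Dict String (List String)
  | [], ps, d => (ps, d)
  | l :: rest, ps, d =>
    if PySem.Str.endswith l ":" then
      let pathway := PySem.Str.strip (PySem.Str.slice l none (some (-1)))
      let genes_line := rest.headD ""
      pvLoopA rest.tail (ps ++ [pathway]) (d.insert pathway (pvGenes genes_line))
    else
      pvLoopA rest ps d
termination_by l _ _ => l.length
decreasing_by all_goals (simp [List.length_tail]; try omega)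

def extract_pathways (answer_text : String) : List String × (List (String × List String)) :=
  let r := pvLoopA (pvLines answer_text) [] PySem.Dict.empty
  (r.1, r.2.items)

-- ===== PORT B =====
-- B's marking pass: flags[i] = lines[i].endswith(':') and not flags[i-1].
def pvFlags : List String → Bool → List Bool
  | [], _ => []
  | l :: rest, prev =>
    let c := PySem.Str.endswith l ":" && !prev
    c :: pvFlags rest c

-- B's assembly: zip(lines, followers, flags) comprehension over the marked triples.
def pvItemsB (lines : List String) : List (String × List String) :=
  ((lines.zip (lines.drop 1 ++ [""])).zip (pvFlags lines false)).filterMap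
    (fun p => if p.2 then
        some (PySem.Str.strip (PySem.Str.slice p.1.1 none (some (-1))), pvGenes p.1.2)
      else none)

def extract_pathways_alt (answer_text : String) : List String × (List (String × List String)) :=
  let items := pvItemsB (pvLines answer_text)
  (items.map Prod.fst,
   (items.foldl (fun d kv => d.insert kv.1 kv.2)
      (PySem.Dict.empty : PySem.Dict String (List String))).items)

-- ===== PRECONDITION & SPEC =====
def Spec_extract_pathways (answer_text : String) (out : List String × (List (String × List String))) : Prop := out = extract_pathways_alt answer_text
instance (answer_text : String) (out : List String × (List (String × List String))) : Decidable (Spec_extract_pathways answer_text out) := by unfold Spec_extract_pathways; infer_instance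

-- ===== CLAIM (what is proved, stated in full; the proofs are below) =====
def Claim_equal_extract_pathways : Prop := ∀ (answer_text : String), Dom_extract_pathways answer_text → Spec_extract_pathways answer_text (extract_pathways answer_text)

-- ===== LEMMAS AND PROOFS =====

-- The item list A produces, read off A's recursion shape.
def pvItemsA : List String → List (String × List String)
  | [] => []
  | l :: rest =>
    if PySem.Str.endswith l ":" then
      (PySem.Str.strip (PySem.Str.slice l none (some (-1))), pvGenes (rest.headD "")) ::
        pvItemsA rest.tail
    else
      pvItemsA rest
termination_by l => l.length
decreasing_by all_goals (simp [List.length_tail]; try omega)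

theorem pvLoopA_eq_items (lines : List String) (ps : List String)
    (d : PySem.Dict String (List String)) :
    pvLoopA lines ps d =
      (ps ++ (pvItemsA lines).map Prod.fst,
       (pvItemsA lines).foldl (fun d kv => d.insert kv.1 kv.2) d) := by
  induction hfuel : lines.length using Nat.strong_induction_on generalizing lines ps d with
  | _ fuel ih =>
  match lines with
  | [] => simp [pvLoopA, pvItemsA]
  | l :: rest =>
    rw [pvLoopA, pvItemsA]
    by_cases hend : PySem.Str.endswith l ":" = true
    · simp only [hend, if_pos]
      rw [ih rest.tail.length (by simp at hfuel; simp [List.length_tail]; omega) rest.tail _ _ rfl]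
      simp [List.foldl]
    · simp only [hend, Bool.false_eq_true, if_neg, not_false_iff]
      exact ih rest.length (by simp at hfuel; omega) rest ps d rfl

-- B's zipped/flagged comprehension generalized over the carried flag.
def pvItemsZ (lines : List String) (prev : Bool) : List (String × List String) :=
  ((lines.zip (lines.drop 1 ++ [""])).zip (pvFlags lines prev)).filterMap
    (fun p => if p.2 then
        some (PySem.Str.strip (PySem.Str.slice p.1.1 none (some (-1))), pvGenes p.1.2)
      else none)

theorem pvItemsZ_cons (l : String) (rest : List String) (prev : Bool) :
    pvItemsZ (l :: rest) prev =
      (if PySem.Str.endswith l ":" && !prev then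
        [(PySem.Str.strip (PySem.Str.slice l none (some (-1))), pvGenes (rest.headD ""))]
      else []) ++ pvItemsZ rest (PySem.Str.endswith l ":" && !prev) := by
  cases rest with
  | nil =>
    cases hc : (PySem.Str.endswith l ":" && !prev) <;>
      simp_all [pvItemsZ, pvFlags]
  | cons x xs =>
    simp only [pvItemsZ, pvFlags, List.drop_succ_cons, List.drop_zero, List.cons_append,
      List.zip_cons_cons, List.filterMap_cons, List.headD_cons]
    split <;> simp_all

theorem pvItemsZ_eq_itemsA (lines : List String) :
    pvItemsZ lines false = pvItemsA lines := by
  induction hfuel : lines.length using Nat.strong_induction_on generalizing lines with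
  | _ fuel ih =>
  match lines with
  | [] => simp [pvItemsZ, pvItemsA, pvFlags]
  | l :: rest =>
    rw [pvItemsZ_cons, pvItemsA]
    by_cases hend : PySem.Str.endswith l ":" = true
    · simp only [hend, Bool.not_false, Bool.and_true, if_pos]
      have htail : pvItemsZ rest true = pvItemsA rest.tail := by
        cases rest with
        | nil => simp [pvItemsZ, pvFlags, pvItemsA]
        | cons x xs =>
          rw [pvItemsZ_cons]
          simp only [Bool.not_true, Bool.and_false, if_neg, List.nil_append,
            List.tail_cons, Bool.false_eq_true, not_false_iff]
          exact ih xs.length (by simp at hfuel; omega) xs rfl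
      simp [htail]
    · simp only [hend, Bool.false_and, if_neg, Bool.false_eq_true, not_false_iff,
        List.nil_append]
      exact ih rest.length (by simp at hfuel; omega) rest rfl

-- ===== VERDICT (by name: the statement is the Claim_ definition above) =====
theorem extract_pathways_spec : Claim_equal_extract_pathways := by
  intro t _
  unfold Spec_extract_pathways extract_pathways extract_pathways_alt
  rw [pvLoopA_eq_items]
  have : pvItemsB (pvLines t) = pvItemsA (pvLines t) := pvItemsZ_eq_itemsA (pvLines t)
  simp [pvItemsB] at this ⊢
  rw [this]
  exact ⟨rfl, rfl⟩
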